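-- pv_equiv track=rewrite | github.com/madhan45-mad/Smart_Expenser_Tracker | expense-tracker/utils/helpers.py | generate_color_palette
-- ===== SOURCE A (Python) =====
-- def generate_color_palette(n: int) -> list:
--     """Generate a pleasing color palette for charts."""
--     base_colors = [
--         '#FF6B6B', '#4ECDC4', '#45B7D1', '#96CEB4', '#FFEAA7',
--         '#DDA0DD', '#98D8C8', '#F7DC6F', '#BB8FCE', '#85C1E9',
--         '#F8B500', '#82E0AA', '#F1948A', '#85929E', '#76D7C4'
--     ]
--
--     if n <= len(base_colors):
--         return base_colors[:n]
--
--     # If more colors needed, repeat with variations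
--     extended = base_colors.copy()
--     while len(extended) < n:
--         extended.extend(base_colors)
--
--     return extended[:n]
-- ===== SOURCE B (Python) =====
-- def generate_color_palette(n: int) -> list:
--     """Generate a pleasing color palette for charts."""
--     base_colors = [
--         '#FF6B6B', '#4ECDC4', '#45B7D1', '#96CEB4', '#FFEAA7',
--         '#DDA0DD', '#98D8C8', '#F7DC6F', '#BB8FCE', '#85C1E9',
--         '#F8B500', '#82E0AA', '#F1948A', '#85929E', '#76D7C4'
--     ]
--     if n <= len(base_colors):
--         return base_colors[:n]
--     # build each position directly by modular index, no copies/truncation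
--     return [base_colors[i % len(base_colors)] for i in range(n)]
-- ===== Notes on version B (the rewrite author's own statement) =====
-- stated objective: idiomatic
-- what changed: Replaces the copy/extend-until-long-enough-then-slice loop with a single pass that computes each position directly as base_colors[i % len(base_colors)] over range(n).
import Mathlib
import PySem

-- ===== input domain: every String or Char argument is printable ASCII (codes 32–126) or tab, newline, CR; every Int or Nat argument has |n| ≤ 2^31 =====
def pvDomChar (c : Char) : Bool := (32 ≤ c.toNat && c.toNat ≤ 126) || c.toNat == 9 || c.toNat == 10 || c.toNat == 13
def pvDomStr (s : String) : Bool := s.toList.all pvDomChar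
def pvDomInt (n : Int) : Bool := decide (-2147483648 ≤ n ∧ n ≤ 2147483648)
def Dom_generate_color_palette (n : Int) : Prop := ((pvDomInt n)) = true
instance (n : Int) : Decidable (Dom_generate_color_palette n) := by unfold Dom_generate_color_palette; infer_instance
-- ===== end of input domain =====

-- B replaces A's copy/extend-then-slice loop with direct modular indexing over range(n) (idiomatic; same cost).

-- ===== PORT A =====
def pvBase : List String :=
  ["#FF6B6B", "#4ECDC4", "#45B7D1", "#96CEB4", "#FFEAA7",
   "#DDA0DD", "#98D8C8", "#F7DC6F", "#BB8FCE", "#85C1E9",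
   "#F8B500", "#82E0AA", "#F1948A", "#85929E", "#76D7C4"]

-- 'while len(extended) < n: extended.extend(base_colors)'
def pvExtendLoop (n : Int) (ext : List String) : List String :=
  if (ext.length : Int) < n then pvExtendLoop n (ext ++ pvBase) else ext
termination_by (n.toNat - ext.length)
decreasing_by
  simp [pvBase]
  omega

def generate_color_palette (n : Int) : List String :=
  if n ≤ PySem.List.len pvBase then PySem.List.slice pvBase none (some n)
  else PySem.List.slice (pvExtendLoop n pvBase) none (some n)

-- ===== PORT B =====
def generate_color_palette_alt (n : Int) : List String :=
  if n ≤ PySem.List.len pvBase then PySem.List.slice pvBase none (some n)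
  else (PySem.List.pyRange 0 n 1).map
    (fun i => PySem.List.pyGetD pvBase (PySem.Int.mod i (PySem.List.len pvBase)) "")

-- ===== PRECONDITION & SPEC =====
def Spec_generate_color_palette (n : Int) (out : List String) : Prop := out = generate_color_palette_alt n
instance (n : Int) (out : List String) : Decidable (Spec_generate_color_palette n out) := by unfold Spec_generate_color_palette; infer_instance

-- ===== CLAIM (what is proved, stated in full; the proofs are below) =====
def Claim_equal_generate_color_palette : Prop := ∀ (n : Int), Dom_generate_color_palette n → Spec_generate_color_palette n (generate_color_palette n)

-- ===== LEMMAS AND PROOFS =====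

-- k concatenated copies of the base palette
def pvRep : Nat → List String
  | 0 => []
  | k + 1 => pvRep k ++ pvBase

lemma pvRep_succ (k : Nat) : pvRep (k + 1) = pvRep k ++ pvBase := rfl

lemma pvRep_length (k : Nat) : (pvRep k).length = 15 * k := by
  induction k with
  | zero => simp [pvRep]
  | succ k ih => simp [pvRep, ih, pvBase]; ring

lemma pvRep_getElem (k i : Nat) (h : i < (pvRep k).length) :
    (pvRep k)[i] = pvBase[i % 15]'(by simp [pvBase]; omega) := by
  induction k with
  | zero => simp [pvRep] at h
  | succ k ih =>
    have hlen := pvRep_length k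
    by_cases hi : i < (pvRep k).length
    · simp only [pvRep_succ]
      rw [List.getElem_append_left hi]
      exact ih hi
    · have h15 : i - (pvRep k).length < 15 := by
        have := pvRep_length (k + 1)
        simp [pvRep] at h
        simp [pvBase] at *
        omega
      simp only [pvRep_succ]
      rw [List.getElem_append_right (by omega)]
      have : i % 15 = i - (pvRep k).length := by omega
      simp [this]

lemma pvExtendLoop_rep (n : Int) (k : Nat) :
    ∃ m, k ≤ m ∧ pvExtendLoop n (pvRep k) = pvRep m ∧ n ≤ ((pvRep m).length : Int) := by
  by_cases h : ((pvRep k).length : Int) < n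
  · have hrec := pvExtendLoop_rep n (k + 1)
    obtain ⟨m, hm, he, hn⟩ := hrec
    refine ⟨m, by omega, ?_, hn⟩
    rw [pvExtendLoop, if_pos h, ← pvRep_succ, he]
  · exact ⟨k, le_refl _, by rw [pvExtendLoop, if_neg h], by omega⟩
termination_by (n.toNat - 15 * k)
decreasing_by
  have := pvRep_length k
  omega

-- ===== VERDICT (by name: the statement is the Claim_ definition above) =====
theorem generate_color_palette_spec : Claim_equal_generate_color_palette := by
  intro n _
  unfold Spec_generate_color_palette generate_color_palette generate_color_palette_alt
  simp only [PySem.List.len_eq]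
  by_cases hle : n ≤ (pvBase.length : Int)
  · rw [if_pos hle, if_pos hle]
  · rw [if_neg hle, if_neg hle]
    have h15 : (15 : Int) < n := by simpa [pvBase] using not_le.mp hle
    obtain ⟨m, hm, he, hn⟩ := pvExtendLoop_rep n 1
    have he' : pvExtendLoop n pvBase = pvRep m := by
      have hrep1 : pvRep 1 = pvBase := by simp [pvRep]
      rw [← hrep1]; exact he
    rw [he']
    have hlen := pvRep_length m
    have hcast : n = ((n.toNat : Nat) : Int) := by omega
    rw [hcast, PySem.List.slice_to_natCast]
    apply List.ext_getElem
    · simp [hlen]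
      omega
    · intro i h1 h2
      have hi_n : i < n.toNat := by simp at h1; omega
      have hirep : i < (pvRep m).length := by omega
      rw [List.getElem_take, pvRep_getElem m i hirep, List.getElem_map]
      rw [PySem.List.getElem_pyRange_one]
      have : PySem.Int.mod (0 + (i : Int)) ((pvBase.length : Nat) : Int) = (((i % 15 : Nat)) : Int) := by
        have hb : ((pvBase.length : Nat) : Int) = 15 := by simp [pvBase]
        rw [hb, zero_add, PySem.Int.mod_eq_emod_of_pos (by omega)]
        omega
      rw [this, PySem.List.pyGetD_natCast]
      have : i % 15 < pvBase.length := by simp [pvBase]; omega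
      simp [List.getD, List.getElem?_eq_getElem this]
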